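-- pv_equiv track=rewrite | github.com/brenuart/LINGE1225 | test_sem9_2.py | plus_longue_periode_croissante01
-- ===== SOURCE A (Python) =====
-- def plus_longue_periode_croissante01(data):
--     # On commence par les cas particuliers...
--     #
--     if len(data) == 0:
--         return 0
--
--     if len(data) == 1:
--         return 1
--
--
--     # A partir d'ici, on sait qu'il y a plus de 1 éléments dans la liste.
--     # On va itérer à partir du second élément (indice 1) et le comparer avec le précédent...
--     #
--     maxSequenceSize = 0
--     sequenceSize = 1 # on sait que la séquence courante est au moins de un élément (le précédent...)
--
--     for i in range(1, len(data)):
--         if data[i-1] < data[i]: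
--             sequenceSize += 1
--         else:
--             if sequenceSize > maxSequenceSize:
--                 maxSequenceSize = sequenceSize
--             sequenceSize = 1
--
--     # Hint: important dans le cas où la liste ne contient qu'une seule séquence toujours croissante...
--     if sequenceSize > maxSequenceSize:
--         maxSequenceSize = sequenceSize
--
--     return maxSequenceSize
-- ===== SOURCE B (Python) =====
-- def plus_longue_periode_croissante01(data):
--     # Boundary-list decomposition: collect the indices where a strictly
--     # increasing run breaks, then the answer is the largest gap between
--     # consecutive boundaries.
--     n = len(data)
--     bounds = [0] + [i for i in range(1, n) if data[i - 1] >= data[i]] + [n]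
--     return max(b - a for a, b in zip(bounds, bounds[1:]))
-- ===== Notes on version B (the rewrite author's own statement) =====
-- stated objective: alternative
-- what changed: Replaces the running counter/maximum state machine with an explicit list of segment boundaries (indices where the increase breaks) followed by a pass taking the maximum difference of consecutive boundaries.
import Mathlib
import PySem

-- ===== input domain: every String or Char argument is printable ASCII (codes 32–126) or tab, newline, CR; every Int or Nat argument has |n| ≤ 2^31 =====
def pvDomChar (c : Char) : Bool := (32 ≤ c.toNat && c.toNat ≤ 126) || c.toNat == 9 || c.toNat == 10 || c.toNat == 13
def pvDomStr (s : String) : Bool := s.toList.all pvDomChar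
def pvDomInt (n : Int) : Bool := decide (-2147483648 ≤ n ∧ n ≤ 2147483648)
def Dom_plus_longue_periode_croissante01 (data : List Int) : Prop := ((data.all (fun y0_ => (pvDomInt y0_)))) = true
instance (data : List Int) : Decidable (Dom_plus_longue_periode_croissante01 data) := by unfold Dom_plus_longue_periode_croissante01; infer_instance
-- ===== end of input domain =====

-- B replaces A's running counter/maximum state machine with an explicit
-- segment-boundary list followed by a maximum-of-gaps pass (alternative
-- decomposition, same cost).

-- ===== PORT A =====
-- A: early returns for len 0/1, then a left fold over range(1, n) maintaining
-- (maxSequenceSize, sequenceSize), then a final flush.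
def plus_longue_periode_croissante01 (data : List Int) : Int :=
  if data.length = 0 then 0
  else if data.length = 1 then 1
  else
    let st :=
      (PySem.List.pyRange 1 (data.length : Int) 1).foldl
        (fun (p : Int × Int) i =>
          if PySem.List.pyGetD data (i - 1) 0 < PySem.List.pyGetD data i 0 then
            (p.1, p.2 + 1)
          else
            (if p.2 > p.1 then p.2 else p.1, 1))
        (0, 1)
    if st.2 > st.1 then st.2 else st.1

-- ===== PORT B =====
-- B: bounds = [0] + [i for i in range(1,n) if data[i-1] >= data[i]] + [n];
-- answer = max(b - a for a, b in zip(bounds, bounds[1:])).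
-- (the [] arm is unreachable: bounds always has at least two elements)
def plus_longue_periode_croissante01_alt (data : List Int) : Int :=
  let n : Int := (data.length : Int)
  let bounds : List Int :=
    0 :: ((PySem.List.pyRange 1 n 1).filter
            (fun i => PySem.List.pyGetD data i 0 ≤ PySem.List.pyGetD data (i - 1) 0)) ++ [n]
  match bounds.zip bounds.tail with
  | [] => 0
  | p :: ps => ps.foldl (fun acc q => max acc (q.2 - q.1)) (p.2 - p.1)

-- ===== PRECONDITION & SPEC =====
def Spec_plus_longue_periode_croissante01 (data : List Int) (out : Int) : Prop := out = plus_longue_periode_croissante01_alt data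
instance (data : List Int) (out : Int) : Decidable (Spec_plus_longue_periode_croissante01 data out) := by unfold Spec_plus_longue_periode_croissante01; infer_instance

-- ===== CLAIM (what is proved, stated in full; the proofs are below) =====
def Claim_equal_plus_longue_periode_croissante01 : Prop := ∀ (data : List Int), Dom_plus_longue_periode_croissante01 data → Spec_plus_longue_periode_croissante01 data (plus_longue_periode_croissante01 data)

-- ===== LEMMAS AND PROOFS =====

-- A's loop body.
def pvStep (data : List Int) (p : Int × Int) (i : Int) : Int × Int :=
  if PySem.List.pyGetD data (i - 1) 0 < PySem.List.pyGetD data i 0 then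
    (p.1, p.2 + 1)
  else
    (if p.2 > p.1 then p.2 else p.1, 1)

-- B's break predicate.
def pvBrk (data : List Int) (i : Int) : Bool :=
  PySem.List.pyGetD data i 0 ≤ PySem.List.pyGetD data (i - 1) 0

-- maximum of m and all gaps between consecutive elements of (prev :: l)
def pvGm (m prev : Int) : List Int → Int
  | [] => m
  | x :: xs => pvGm (max m (x - prev)) x xs

-- last element of (prev :: l)
def pvLp (prev : Int) : List Int → Int
  | [] => prev
  | x :: xs => pvLp x xs

theorem pvLp_append (prev e : Int) (l : List Int) : pvLp prev (l ++ [e]) = e := by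
  induction l generalizing prev with
  | nil => rfl
  | cons x xs ih => simpa [pvLp] using ih x

theorem pvGm_append (l : List Int) (m prev e : Int) :
    pvGm m prev (l ++ [e]) = max (pvGm m prev l) (e - pvLp prev l) := by
  induction l generalizing m prev with
  | nil => rfl
  | cons x xs ih => simpa [pvGm, pvLp] using ih (max m (x - prev)) x

theorem pvZipFold (l : List Int) (prev acc : Int) :
    (List.zip (prev :: l) l).foldl (fun acc q => max acc (q.2 - q.1)) acc
      = pvGm acc prev l := by
  induction l generalizing prev acc with
  | nil => rfl
  | cons x xs ih => simpa [pvGm] using ih x (max acc (x - prev))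

-- max written as A writes it
theorem pvIfMax (m s : Int) : (if s > m then s else m) = max m s := by
  split_ifs with h <;> omega

-- A's loop invariant, by induction on the processed prefix 1..k.
theorem pvInv (data : List Int) (j : Nat) :
    (PySem.List.pyRange 1 (1 + (j : Int)) 1).foldl (pvStep data) (0, 1)
      = (pvGm 0 0 ((PySem.List.pyRange 1 (1 + (j : Int)) 1).filter (pvBrk data)),
         (1 + (j : Int)) - pvLp 0 ((PySem.List.pyRange 1 (1 + (j : Int)) 1).filter (pvBrk data))) := by
  induction j with
  | zero =>
    rw [show (1 + ((0 : Nat) : Int)) = 1 by norm_num, PySem.List.pyRange_one_eq_nil (by omega)]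
    simp [pvGm, pvLp]
  | succ k ih =>
    have hsplit : PySem.List.pyRange 1 (1 + ((k : Int) + 1)) 1
        = PySem.List.pyRange 1 (1 + (k : Int)) 1 ++ [1 + (k : Int)] := by
      have := PySem.List.pyRange_one_succ_right (a := 1) (b := 1 + (k : Int)) (by omega)
      simpa [add_comm, add_left_comm, add_assoc] using this
    push_cast
    rw [hsplit, List.foldl_append, List.filter_append, ih]
    simp only [List.foldl_cons, List.foldl_nil, List.filter_cons, List.filter_nil]
    by_cases hb : PySem.List.pyGetD data (1 + (k : Int)) 0 ≤ PySem.List.pyGetD data (1 + (k : Int) - 1) 0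
    · rw [show pvBrk data (1 + (k : Int)) = true from decide_eq_true hb]
      unfold pvStep
      rw [if_neg (not_lt.mpr hb)]
      dsimp only
      rw [if_pos rfl, pvGm_append, pvLp_append, pvIfMax]
      simp only [Prod.mk.injEq]
      exact ⟨trivial, by omega⟩
    · rw [show pvBrk data (1 + (k : Int)) = false from decide_eq_false hb]
      unfold pvStep
      rw [if_pos (not_le.mp hb)]
      dsimp only
      rw [if_neg (by simp)]
      simp only [List.append_nil, Prod.mk.injEq]
      exact ⟨trivial, by omega⟩

-- every break position is ≥ 1
theorem pvBrk_pos (data : List Int) (n : Int) (x : Int)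
    (hx : x ∈ (PySem.List.pyRange 1 n 1).filter (pvBrk data)) : 1 ≤ x := by
  have := List.mem_filter.mp hx
  exact (PySem.List.mem_pyRange_one.mp this.1).1

-- B's match-expression equals pvGm 0 0 over l when the head is ≥ 0
theorem pvB_eq_gm (l : List Int) (h0 : 0 ≤ l.headD 0) :
    (match (0 :: l).zip ((0 : Int) :: l).tail with
     | [] => (0 : Int)
     | p :: ps => ps.foldl (fun acc q => max acc (q.2 - q.1)) (p.2 - p.1))
      = pvGm 0 0 l := by
  cases l with
  | nil => rfl
  | cons x xs =>
    simp only [List.tail, List.zip_cons_cons]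
    rw [pvZipFold xs x (x - 0)]
    have hx : x - 0 = max 0 (x - 0) := by simp only [List.headD] at h0; omega
    rw [hx]
    rfl

-- ===== VERDICT (by name: the statement is the Claim_ definition above) =====
theorem plus_longue_periode_croissante01_spec : Claim_equal_plus_longue_periode_croissante01 := by
  intro data _
  unfold Spec_plus_longue_periode_croissante01
  rcases hn : data.length with _ | m
  · -- n = 0
    have : data = [] := List.length_eq_zero_iff.mp hn
    subst this; rfl
  · -- n = m + 1 ≥ 1
    have hinv := pvInv data m
    have hcast : (1 : Int) + (m : Int) = ((m + 1 : Nat) : Int) := by push_cast; ring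
    rw [hcast] at hinv
    set n : Int := ((m + 1 : Nat) : Int) with hndef
    set bl : List Int := (PySem.List.pyRange 1 n 1).filter (pvBrk data) with hbl
    have hhead : 0 ≤ (bl ++ [n]).headD 0 := by
      cases hblc : bl with
      | nil => simp [hndef]; positivity
      | cons x xs =>
        have : 1 ≤ x := pvBrk_pos data n x (by rw [← hbl, hblc]; exact List.mem_cons_self)
        simp; omega
    have hB := pvB_eq_gm (bl ++ [n]) hhead
    rw [pvGm_append] at hB
    have hAlt : plus_longue_periode_croissante01_alt data
        = max (pvGm 0 0 bl) (n - pvLp 0 bl) := by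
      have h1 : plus_longue_periode_croissante01_alt data
          = (match (0 :: (bl ++ [n])).zip ((0 : Int) :: (bl ++ [n])).tail with
             | [] => (0 : Int)
             | p :: ps => ps.foldl (fun acc q => max acc (q.2 - q.1)) (p.2 - p.1)) := by
        unfold plus_longue_periode_croissante01_alt
        simp only [hn]
        rfl
      rw [h1, hB]
    rw [hAlt]
    unfold plus_longue_periode_croissante01
    rw [hn]
    rcases Nat.eq_zero_or_pos m with hm | hm
    · -- single element: A returns 1 early
      subst hm
      rw [if_neg (by omega), if_pos rfl]
      have hbl0 : bl = [] := by
        rw [hbl, hndef]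
        rw [show (((0 + 1 : Nat) : Int)) = 1 by norm_num, PySem.List.pyRange_one_eq_nil (by omega)]
        rfl
      rw [hbl0]
      simp only [pvGm, pvLp, hndef]
      norm_num
    · rw [if_neg (by omega), if_neg (by omega)]
      have hstep : (fun (p : Int × Int) i =>
          if PySem.List.pyGetD data (i - 1) 0 < PySem.List.pyGetD data i 0 then
            (p.1, p.2 + 1)
          else
            (if p.2 > p.1 then p.2 else p.1, 1)) = pvStep data := rfl
      simp only [hstep, ← hndef]
      rw [hinv]
      exact pvIfMax _ _
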